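-- pv_equiv track=rewrite | github.com/stevesgl/smart-grocery-backend | ingredient_parser.py | calculate_nova_score
-- ===== SOURCE A (Python) =====
-- def calculate_nova_score(parsed_ingredients):
--     """
--     Calculates the NOVA score based on ingredient categories.
--
--     NOVA Score Categories:
--     1: Unprocessed or minimally processed foods
--     2: Processed culinary ingredients
--     3: Processed foods
--     4: Ultra-processed foods
--
--     This function simplifies NOVA classification based on the trust_report_category.
--     """
--     # Initialize counts for each simplified NOVA group
--     group_1_count = 0  # Common food only
--     group_2_count = 0  # FDA non-common (preservatives, additives, etc.) - often indicates processed culinary ingredients/processed foods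
--     group_3_count = 0  # Complex, potentially ultra-processed (currently mapping common_fda_regulated, as these are often highly processed components)
--     group_4_count = 0  # Truly unidentified (unknown impact, safer to lean towards higher processing)
--
--     for ingredient in parsed_ingredients:
--         category = ingredient.get("trust_report_category")
--         if category == "common_food_only":
--             group_1_count += 1
--         elif category == "fda_non_common":
--             group_2_count += 1
--         elif category == "common_fda_regulated":
--             group_3_count += 1 # These are specific additives often in processed/ultra-processed foods
--         elif category == "truly_unidentified":
--             group_4_count += 1 # Unknown, assume higher processing for safety/completeness
--
--     total_count = len(parsed_ingredients)
--
--     if total_count == 0: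
--         return 0 # Or handle as "N/A"
--
--     # Determine overall NOVA score based on the highest category present
--     # Prioritize higher NOVA categories if their ingredients are present
--     if group_4_count > 0:
--         return 4 # Ultra-processed if truly unidentified ingredients are present
--     elif group_3_count > 0:
--         return 4 # Common FDA regulated (e.g., Sodium Benzoate, HFCS) often indicate ultra-processed
--     elif group_2_count > 0:
--         return 3 # FDA non-common (other additives) implies processed foods
--     elif group_1_count > 0:
--         return 1 # Only common food items
--     else:
--         return 0 # Should not happen if there are ingredients, but a fallback
-- ===== SOURCE B (Python) =====
-- _NOVA_MAP = {
--     "common_food_only": 1,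
--     "fda_non_common": 3,
--     "common_fda_regulated": 4,
--     "truly_unidentified": 4,
-- }
--
-- def calculate_nova_score(parsed_ingredients):
--     return max(
--         (_NOVA_MAP.get(ing.get("trust_report_category"), 0) for ing in parsed_ingredients),
--         default=0,
--     )
-- ===== Notes on version B (the rewrite author's own statement) =====
-- stated objective: simpler
-- what changed: Replaced the four counters plus priority-ordered if/elif cascade with a single max-reduction over a static category->score lookup table.
import Mathlib
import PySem

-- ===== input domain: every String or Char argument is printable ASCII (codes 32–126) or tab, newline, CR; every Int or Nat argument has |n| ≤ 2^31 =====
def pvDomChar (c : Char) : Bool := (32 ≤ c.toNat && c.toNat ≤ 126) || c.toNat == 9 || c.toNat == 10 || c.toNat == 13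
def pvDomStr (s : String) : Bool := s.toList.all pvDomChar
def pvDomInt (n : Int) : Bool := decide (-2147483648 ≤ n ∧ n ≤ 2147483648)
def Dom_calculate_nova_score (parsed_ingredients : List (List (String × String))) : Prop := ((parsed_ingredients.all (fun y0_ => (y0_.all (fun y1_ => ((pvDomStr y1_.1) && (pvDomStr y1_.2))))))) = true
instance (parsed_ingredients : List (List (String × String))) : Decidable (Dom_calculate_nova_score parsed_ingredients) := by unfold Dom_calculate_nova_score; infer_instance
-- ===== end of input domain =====

-- B replaces A's four counters and priority if/elif cascade with a max-reduction over a
-- static category->score lookup table (objective: simpler).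

-- ===== PORT A =====
-- ingredient.get("trust_report_category") : first-match lookup in the association list
def pvGetCat (ingredient : List (String × String)) : Option String :=
  (PySem.Dict.mk ingredient).get? "trust_report_category"

-- the for-loop accumulating the four counters
def pvCountStep (st : Int × Int × Int × Int) (ingredient : List (String × String)) :
    Int × Int × Int × Int :=
  let (g1, g2, g3, g4) := st
  let category := pvGetCat ingredient
  if category = some "common_food_only" then (g1 + 1, g2, g3, g4)
  else if category = some "fda_non_common" then (g1, g2 + 1, g3, g4)
  else if category = some "common_fda_regulated" then (g1, g2, g3 + 1, g4)
  else if category = some "truly_unidentified" then (g1, g2, g3, g4 + 1)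
  else (g1, g2, g3, g4)

def calculate_nova_score (parsed_ingredients : List (List (String × String))) : Int :=
  let st := parsed_ingredients.foldl pvCountStep (0, 0, 0, 0)
  let (g1, g2, g3, g4) := st
  let total_count : Int := parsed_ingredients.length
  if total_count = 0 then 0
  else if g4 > 0 then 4
  else if g3 > 0 then 4
  else if g2 > 0 then 3
  else if g1 > 0 then 1
  else 0

-- ===== PORT B =====
def pvNovaMap : PySem.Dict String Int :=
  PySem.Dict.ofList
    [("common_food_only", 1), ("fda_non_common", 3),
     ("common_fda_regulated", 4), ("truly_unidentified", 4)]

def pvScore (ingredient : List (String × String)) : Int :=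
  match (PySem.Dict.mk ingredient).get? "trust_report_category" with
  | some c => pvNovaMap.getD c 0
  | none => 0

-- max(generator, default=0)
def calculate_nova_score_alt (parsed_ingredients : List (List (String × String))) : Int :=
  parsed_ingredients.foldl (fun m ing => max m (pvScore ing)) 0

-- ===== PRECONDITION & SPEC =====
def Spec_calculate_nova_score (parsed_ingredients : List (List (String × String))) (out : Int) : Prop := out = calculate_nova_score_alt parsed_ingredients
instance (parsed_ingredients : List (List (String × String))) (out : Int) : Decidable (Spec_calculate_nova_score parsed_ingredients out) := by unfold Spec_calculate_nova_score; infer_instance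

-- ===== CLAIM (what is proved, stated in full; the proofs are below) =====
def Claim_equal_calculate_nova_score : Prop := ∀ (parsed_ingredients : List (List (String × String))), Dom_calculate_nova_score parsed_ingredients → Spec_calculate_nova_score parsed_ingredients (calculate_nova_score parsed_ingredients)

-- ===== LEMMAS AND PROOFS =====

-- A's verdict as a function of the final counters
def pvVerdict (st : Int × Int × Int × Int) : Int :=
  let (g1, g2, g3, g4) := st
  if g4 > 0 then 4 else if g3 > 0 then 4 else if g2 > 0 then 3 else if g1 > 0 then 1 else 0

lemma pvNovaMap_eq :
    pvNovaMap = PySem.Dict.mk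
      [("common_food_only", 1), ("fda_non_common", 3),
       ("common_fda_regulated", 4), ("truly_unidentified", 4)] := by rfl

-- the score of one ingredient, expressed through A's branch conditions
lemma pvScore_eq_branches (ing : List (String × String)) :
    pvScore ing =
      (if pvGetCat ing = some "common_food_only" then 1
       else if pvGetCat ing = some "fda_non_common" then 3
       else if pvGetCat ing = some "common_fda_regulated" then 4
       else if pvGetCat ing = some "truly_unidentified" then 4
       else 0) := by
  unfold pvScore pvGetCat
  cases h : (PySem.Dict.mk ing).get? "trust_report_category" with
  | none => simp
  | some c =>
    simp only [Option.some.injEq]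
    by_cases h1 : c = "common_food_only"
    · subst h1; decide
    by_cases h2 : c = "fda_non_common"
    · subst h2; decide
    by_cases h3 : c = "common_fda_regulated"
    · subst h3; decide
    by_cases h4 : c = "truly_unidentified"
    · subst h4; decide
    · rw [if_neg h1, if_neg h2, if_neg h3, if_neg h4]
      rw [pvNovaMap_eq]
      simp only [PySem.Dict.getD]
      rw [PySem.Dict.get?_mk_cons, PySem.Dict.get?_mk_cons,
          PySem.Dict.get?_mk_cons, PySem.Dict.get?_mk_cons]
      simp [beq_iff_eq, Ne.symm h1, Ne.symm h2, Ne.symm h3, Ne.symm h4, PySem.Dict.get?]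

-- main invariant: running A's counter loop from nonnegative counters and taking the verdict
-- equals folding max of pvScore starting from the verdict of the initial counters
lemma pvMain (xs : List (List (String × String))) (g1 g2 g3 g4 : Int)
    (h1 : 0 ≤ g1) (h2 : 0 ≤ g2) (h3 : 0 ≤ g3) (h4 : 0 ≤ g4) :
    pvVerdict (xs.foldl pvCountStep (g1, g2, g3, g4)) =
      xs.foldl (fun m ing => max m (pvScore ing)) (pvVerdict (g1, g2, g3, g4)) := by
  induction xs generalizing g1 g2 g3 g4 with
  | nil => rfl
  | cons ing rest ih =>
    simp only [List.foldl_cons]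
    have hstep : pvCountStep (g1, g2, g3, g4) ing =
        (if pvGetCat ing = some "common_food_only" then (g1 + 1, g2, g3, g4)
         else if pvGetCat ing = some "fda_non_common" then (g1, g2 + 1, g3, g4)
         else if pvGetCat ing = some "common_fda_regulated" then (g1, g2, g3 + 1, g4)
         else if pvGetCat ing = some "truly_unidentified" then (g1, g2, g3, g4 + 1)
         else (g1, g2, g3, g4)) := rfl
    rw [hstep, pvScore_eq_branches ing]
    split_ifs with c1 c2 c3 c4
    · rw [ih _ _ _ _ (by omega) h2 h3 h4]
      congr 1
      simp only [pvVerdict]; split_ifs <;> omega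
    · rw [ih _ _ _ _ h1 (by omega) h3 h4]
      congr 1
      simp only [pvVerdict]; split_ifs <;> omega
    · rw [ih _ _ _ _ h1 h2 (by omega) h4]
      congr 1
      simp only [pvVerdict]; split_ifs <;> omega
    · rw [ih _ _ _ _ h1 h2 h3 (by omega)]
      congr 1
      simp only [pvVerdict]; split_ifs <;> omega
    · rw [ih _ _ _ _ h1 h2 h3 h4]
      congr 1
      simp only [pvVerdict]; split_ifs <;> omega

-- ===== VERDICT (by name: the statement is the Claim_ definition above) =====
theorem calculate_nova_score_spec : Claim_equal_calculate_nova_score := by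
  intro xs _
  show calculate_nova_score xs = calculate_nova_score_alt xs
  cases xs with
  | nil => rfl
  | cons ing rest =>
    unfold calculate_nova_score calculate_nova_score_alt
    have hlen : ((ing :: rest).length : Int) ≠ 0 := by
      simp [List.length_cons]
      omega
    simp only [hlen, if_false]
    have := pvMain (ing :: rest) 0 0 0 0 le_rfl le_rfl le_rfl le_rfl
    have hv0 : pvVerdict (0, 0, 0, 0) = 0 := rfl
    rw [hv0] at this
    -- the else-branches of A after the length test coincide with pvVerdict
    calc (match (ing :: rest).foldl pvCountStep (0, 0, 0, 0) with
          | (g1, g2, g3, g4) =>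
            if g4 > 0 then (4 : Int) else if g3 > 0 then 4 else if g2 > 0 then 3
            else if g1 > 0 then 1 else 0)
        = pvVerdict ((ing :: rest).foldl pvCountStep (0, 0, 0, 0)) := rfl
      _ = (ing :: rest).foldl (fun m i => max m (pvScore i)) 0 := this
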